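-- pv_equiv track=rewrite | github.com/dcross23/AoC2020 | Day5/p5.py | binaryRowSearch
-- ===== SOURCE A (Python) =====
-- def binaryRowSearch(row, remainingRows):
--     if not row or len(remainingRows) == 1:
--         return remainingRows[0]
--     else:
--         if row[0] == 'F':
--             remainingRows = [remainingRows[0], int((remainingRows[0] + remainingRows[1])/2)]
--
--         elif row[0] == 'B':
--             remainingRows = [int((remainingRows[0] + remainingRows[1])/2)+1, remainingRows[1]]
--
--         return binaryRowSearch(row[1:], remainingRows)
-- ===== SOURCE B (Python) =====
-- def binaryRowSearch(row, remainingRows):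
--     lo = remainingRows[0]
--     if not row or len(remainingRows) == 1:
--         return lo
--     hi = remainingRows[1]
--     for c in row:
--         m = int((lo + hi) / 2)
--         if c == 'F':
--             hi = m
--         elif c == 'B':
--             lo = m + 1
--     return lo
-- ===== Notes on version B (the rewrite author's own statement) =====
-- stated objective: faster
-- what changed: Replaced the recursion that rebuilds a fresh two-element list and slices the string at every step by a single iterative pass over the characters maintaining two integer bounds (lo, hi).
import Mathlib
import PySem

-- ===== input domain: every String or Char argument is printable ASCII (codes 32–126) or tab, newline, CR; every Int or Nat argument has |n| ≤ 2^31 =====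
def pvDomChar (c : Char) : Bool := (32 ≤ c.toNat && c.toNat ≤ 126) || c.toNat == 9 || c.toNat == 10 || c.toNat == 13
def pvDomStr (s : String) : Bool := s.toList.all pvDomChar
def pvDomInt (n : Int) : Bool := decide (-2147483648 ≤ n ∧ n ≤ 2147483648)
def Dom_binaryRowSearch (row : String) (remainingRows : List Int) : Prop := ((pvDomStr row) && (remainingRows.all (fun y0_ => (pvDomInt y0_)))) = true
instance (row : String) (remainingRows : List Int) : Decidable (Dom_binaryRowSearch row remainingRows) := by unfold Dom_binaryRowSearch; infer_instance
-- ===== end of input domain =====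

-- ===== PORT A =====
-- B replaces A's recursion-with-list-slicing by a single iterative pass over the
-- characters maintaining (lo, hi); objective: faster (no per-step string slicing).
-- Python's int((lo+hi)/2) is truncating division; within Dom the float division is
-- exact (|lo+hi| ≤ 2^33 < 2^53), so it is ported exactly as Int.tdiv.
-- Pre_ excludes remainingRows = [], where both Pythons raise IndexError.
def binaryRowSearchGo : List Char → List Int → Int
  | [], rs => rs.getD 0 0
  | c :: rest, rs =>
    if rs.length = 1 then rs.getD 0 0
    else
      let rs' :=
        if c = 'F' then [rs.getD 0 0, Int.tdiv (rs.getD 0 0 + rs.getD 1 0) 2]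
        else if c = 'B' then [Int.tdiv (rs.getD 0 0 + rs.getD 1 0) 2 + 1, rs.getD 1 0]
        else rs
      binaryRowSearchGo rest rs'

def binaryRowSearch (row : String) (remainingRows : List Int) : Int :=
  binaryRowSearchGo row.toList remainingRows

-- ===== PORT B =====
def binaryRowSearchLoop : List Char → Int → Int → Int
  | [], lo, _ => lo
  | c :: rest, lo, hi =>
    let m := Int.tdiv (lo + hi) 2
    if c = 'F' then binaryRowSearchLoop rest lo m
    else if c = 'B' then binaryRowSearchLoop rest (m + 1) hi
    else binaryRowSearchLoop rest lo hi

def binaryRowSearch_alt (row : String) (remainingRows : List Int) : Int :=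
  let lo := remainingRows.getD 0 0
  if row.toList = [] ∨ remainingRows.length = 1 then lo
  else binaryRowSearchLoop row.toList lo (remainingRows.getD 1 0)

-- ===== PRECONDITION & SPEC =====
-- Pre_ excludes exactly remainingRows = [], on which A raises IndexError.
def Pre_binaryRowSearch (_row : String) (remainingRows : List Int) : Prop := remainingRows ≠ []
instance (row : String) (remainingRows : List Int) : Decidable (Pre_binaryRowSearch row remainingRows) := by unfold Pre_binaryRowSearch; infer_instance
def pvWitness_binaryRowSearch : String × List Int := ("FBF", [0, 7])

def Spec_binaryRowSearch (row : String) (remainingRows : List Int) (out : Int) : Prop := out = binaryRowSearch_alt row remainingRows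
instance (row : String) (remainingRows : List Int) (out : Int) : Decidable (Spec_binaryRowSearch row remainingRows out) := by unfold Spec_binaryRowSearch; infer_instance

-- ===== CLAIM (what is proved, stated in full; the proofs are below) =====
def Claim_equal_binaryRowSearch : Prop := ∀ (row : String) (remainingRows : List Int), Dom_binaryRowSearch row remainingRows → Pre_binaryRowSearch row remainingRows → Spec_binaryRowSearch row remainingRows (binaryRowSearch row remainingRows)

-- ===== LEMMAS AND PROOFS =====
theorem go_eq_loop (cs : List Char) : ∀ rs : List Int, 2 ≤ rs.length →
    binaryRowSearchGo cs rs = binaryRowSearchLoop cs (rs.getD 0 0) (rs.getD 1 0) := by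
  induction cs with
  | nil => intro rs h; simp [binaryRowSearchGo, binaryRowSearchLoop]
  | cons c rest ih =>
    intro rs h
    have hne : rs.length ≠ 1 := by omega
    by_cases hF : c = 'F'
    · simp only [binaryRowSearchGo, binaryRowSearchLoop, hne, hF, if_true, if_false]
      rw [ih [rs.getD 0 0, Int.tdiv (rs.getD 0 0 + rs.getD 1 0) 2] (by simp)]
      simp
    · by_cases hB : c = 'B'
      · simp only [binaryRowSearchGo, binaryRowSearchLoop, hne, hB, if_false, if_true]
        rw [if_neg (by decide : ¬('B':Char) = 'F'), if_neg (by decide : ¬('B':Char) = 'F')]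
        rw [ih [Int.tdiv (rs.getD 0 0 + rs.getD 1 0) 2 + 1, rs.getD 1 0] (by simp)]
        simp
      · simp only [binaryRowSearchGo, binaryRowSearchLoop, hne, hF, hB, if_false]
        exact ih rs h

-- ===== VERDICT (by name: the statement is the Claim_ definition above) =====
theorem binaryRowSearch_spec : Claim_equal_binaryRowSearch := by
  intro row rs _ hpre
  unfold Spec_binaryRowSearch binaryRowSearch binaryRowSearch_alt
  by_cases hrow : row.toList = []
  · simp [hrow, binaryRowSearchGo]
  · by_cases h1 : rs.length = 1
    · cases hcs : row.toList with
      | nil => exact absurd hcs hrow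
      | cons c rest => simp [binaryRowSearchGo, h1]
    · have h2 : 2 ≤ rs.length := by
        cases rs with
        | nil => exact absurd rfl hpre
        | cons a t => cases t with
          | nil => exact absurd rfl h1
          | cons b u => simp
      simp only [hrow, h1, or_self, if_false]
      exact go_eq_loop row.toList rs h2
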